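-- pv_equiv track=rewrite | github.com/Rahul-IIT-B/TriSignal-NeuralFusion-Trader | src/python/generate_dataset.py | process_signals
-- ===== SOURCE A (Python) =====
-- def process_signals(signals):
--     """
--     Modify the signal values:
--     - For a long trade (1), remain in the trade until a sell signal (-1) is encountered.
--     - For a short trade (-1), remain in the trade until a buy signal (1) is encountered.
--     - Reset to 0 when no active trade exists.
--     """
--     processed_signals = []
--     state = 0  # 0 means "stay out", 1 means "long trade", -1 means "short trade"
--
--     for signal in signals:
--         if signal == 1:  # Enter long trade
--             state = 1
--         elif signal == -1:  # Enter short trade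
--             state = -1
--         elif state == 1 and signal == -1:  # Exit long trade
--             state = 0
--         elif state == -1 and signal == 1:  # Exit short trade
--             state = 0
--         processed_signals.append(state)
--
--     return processed_signals
-- ===== SOURCE B (Python) =====
-- def process_signals(signals):
--     # Stage 1: run-length encode the position stream as (state, length) segments.
--     runs = []
--     cur, length = 0, 0
--     for x in signals:
--         if x == 1 or x == -1:
--             runs.append((cur, length))
--             cur, length = x, 1
--         else:
--             length += 1
--     runs.append((cur, length))
--     # Stage 2: expand the segments back into the full position list.
--     return [v for v, k in runs for _ in range(k)]
-- ===== Notes on version B (the rewrite author's own statement) =====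
-- stated objective: alternative
-- what changed: Replaces A's per-element state loop by a two-stage pipeline: first run-length encode the signal stream into (position, segment-length) pairs, then expand those segments by replication into the output list.
import Mathlib
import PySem

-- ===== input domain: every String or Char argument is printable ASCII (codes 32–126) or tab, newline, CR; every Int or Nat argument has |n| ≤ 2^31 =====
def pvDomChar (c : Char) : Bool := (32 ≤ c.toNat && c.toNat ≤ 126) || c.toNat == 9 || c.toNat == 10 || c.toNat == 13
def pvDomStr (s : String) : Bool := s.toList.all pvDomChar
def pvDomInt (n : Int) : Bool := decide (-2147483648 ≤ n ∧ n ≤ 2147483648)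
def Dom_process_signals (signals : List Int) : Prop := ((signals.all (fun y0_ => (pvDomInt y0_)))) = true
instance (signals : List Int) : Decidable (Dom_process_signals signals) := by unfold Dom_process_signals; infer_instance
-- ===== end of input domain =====

-- B replaces A's per-element state loop by a two-stage pipeline (run-length encode into
-- (position, length) segments, then expand by replication); same O(n) cost (objective: alternative).

-- ===== PORT A =====
-- A: loop over signals, mutating `state` and appending it to `processed_signals`.
def pvLoopA (state : Int) (acc : List Int) : List Int → List Int
  | [] => acc
  | signal :: rest =>
      let state' : Int :=
        if signal = 1 then 1
        else if signal = -1 then -1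
        else if state = 1 ∧ signal = -1 then 0
        else if state = -1 ∧ signal = 1 then 0
        else state
      pvLoopA state' (acc ++ [state']) rest

def process_signals (signals : List Int) : List Int :=
  pvLoopA 0 [] signals

-- ===== PORT B =====
-- Stage 1 of Source B: the encoding loop over signals carrying (runs, cur, length);
-- the final `runs.append((cur, length))` is the base case.
def pvRunsB (runs : List (Int × Int)) (cur : Int) (len : Int) : List Int → List (Int × Int)
  | [] => runs ++ [(cur, len)]
  | x :: rest =>
      if x = 1 ∨ x = -1 then pvRunsB (runs ++ [(cur, len)]) x 1 rest
      else pvRunsB runs cur (len + 1) rest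

-- Stage 2 of Source B: [v for v, k in runs for _ in range(k)]
def pvExpandB (runs : List (Int × Int)) : List Int :=
  runs.flatMap (fun p => (PySem.List.pyRange 0 p.2 1).map (fun _ => p.1))

def process_signals_alt (signals : List Int) : List Int :=
  pvExpandB (pvRunsB [] 0 0 signals)

-- ===== PRECONDITION & SPEC =====
def Spec_process_signals (signals : List Int) (out : List Int) : Prop := out = process_signals_alt signals
instance (signals : List Int) (out : List Int) : Decidable (Spec_process_signals signals out) := by unfold Spec_process_signals; infer_instance

-- ===== CLAIM (what is proved, stated in full; the proofs are below) =====
def Claim_equal_process_signals : Prop := ∀ (signals : List Int), Dom_process_signals signals → Spec_process_signals signals (process_signals signals)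

-- ===== LEMMAS AND PROOFS =====

-- The list of states A's loop appends, without the accumulator.
def pvScanA (state : Int) : List Int → List Int
  | [] => []
  | x :: rest =>
      let s' : Int := if x = 1 ∨ x = -1 then x else state
      s' :: pvScanA s' rest

theorem pvLoopA_eq_scan (xs : List Int) : ∀ (state : Int) (acc : List Int),
    pvLoopA state acc xs = acc ++ pvScanA state xs := by
  induction xs with
  | nil => intro state acc; simp [pvLoopA, pvScanA]
  | cons x rest ih =>
      intro state acc
      have hstep :
          (if x = 1 then (1 : Int)
           else if x = -1 then -1
           else if state = 1 ∧ x = -1 then 0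
           else if state = -1 ∧ x = 1 then 0
           else state) = if x = 1 ∨ x = -1 then x else state := by
        by_cases h1 : x = 1 <;> by_cases h2 : x = -1 <;> simp [h1, h2]
      simp only [pvLoopA, pvScanA, hstep, ih]
      simp

theorem pvExpand_single (v k : Int) :
    pvExpandB [(v, k)] = List.replicate k.toNat v := by
  simp [pvExpandB, List.map_const', PySem.List.length_pyRange_one]

theorem pvExpand_append (r1 r2 : List (Int × Int)) :
    pvExpandB (r1 ++ r2) = pvExpandB r1 ++ pvExpandB r2 := by
  simp [pvExpandB]

theorem pvRunsB_expand (xs : List Int) : ∀ (runs : List (Int × Int)) (cur len : Int), 0 ≤ len →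
    pvExpandB (pvRunsB runs cur len xs) =
      pvExpandB runs ++ List.replicate len.toNat cur ++ pvScanA cur xs := by
  induction xs with
  | nil =>
      intro runs cur len _
      simp [pvRunsB, pvScanA, pvExpand_append, pvExpand_single]
  | cons x rest ih =>
      intro runs cur len hlen
      by_cases h : x = 1 ∨ x = -1
      · rw [show pvRunsB runs cur len (x :: rest) = pvRunsB (runs ++ [(cur, len)]) x 1 rest
              from by simp [pvRunsB, h],
            ih (runs ++ [(cur, len)]) x 1 (by norm_num), pvExpand_append, pvExpand_single]
        simp [pvScanA, h]
      · rw [show pvRunsB runs cur len (x :: rest) = pvRunsB runs cur (len + 1) rest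
              from by simp [pvRunsB, h],
            ih runs cur (len + 1) (by omega)]
        have h1 : (len + 1).toNat = len.toNat + 1 := by omega
        rw [h1, List.replicate_succ']
        simp [pvScanA, h]

-- ===== VERDICT (by name: the statement is the Claim_ definition above) =====
theorem process_signals_spec : Claim_equal_process_signals := by
  intro signals _
  unfold Spec_process_signals process_signals process_signals_alt
  rw [pvLoopA_eq_scan, pvRunsB_expand signals [] 0 0 le_rfl]
  simp [pvExpandB]
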